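-- pv_equiv track=rewrite | github.com/liv0505/storage-net | topo_sim/torus_twist.py | _axis_wrap_vectors
-- ===== SOURCE A (Python) =====
-- from itertools import product
--
-- def _half_shift_choices(size: int) -> tuple[int, ...]:
--     normalized_size = int(size)
--     if normalized_size <= 1:
--         return (0,)
--     return tuple(sorted({0, normalized_size // 2}))
--
-- def _axis_wrap_vectors(shape: tuple[int, ...], axis: int) -> list[tuple[int, ...]]:
--     if int(shape[axis]) <= 1:
--         return [tuple(0 for _ in shape)]
--
--     per_dim_choices: list[tuple[int, ...]] = []
--     for dim, size in enumerate(shape):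
--         if dim == axis:
--             per_dim_choices.append((0,))
--             continue
--         per_dim_choices.append(_half_shift_choices(int(size)))
--     return [tuple(int(value) for value in values) for values in product(*per_dim_choices)]
-- ===== SOURCE B (Python) =====
-- def _axis_wrap_vectors(shape, axis):
--     if int(shape[axis]) <= 1:
--         return [(0,) * len(shape)]
--     out = [(0,) * len(shape)]
--     for j in range(len(shape) - 1, -1, -1):
--         size = int(shape[j])
--         if j == axis or size <= 1:
--             continue
--         half = size // 2
--         out = out + [v[:j] + (half,) + v[j + 1:] for v in out]
--     return out
-- ===== Notes on version B (the rewrite author's own statement) =====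
-- stated objective: alternative
-- what changed: Replaces the per-dimension choice lists and the itertools.product call with iterative output doubling: start from the single all-zero vector and, scanning dimensions right to left, append to the output list a half-shifted copy of every vector built so far for each varying dimension.
import Mathlib
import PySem

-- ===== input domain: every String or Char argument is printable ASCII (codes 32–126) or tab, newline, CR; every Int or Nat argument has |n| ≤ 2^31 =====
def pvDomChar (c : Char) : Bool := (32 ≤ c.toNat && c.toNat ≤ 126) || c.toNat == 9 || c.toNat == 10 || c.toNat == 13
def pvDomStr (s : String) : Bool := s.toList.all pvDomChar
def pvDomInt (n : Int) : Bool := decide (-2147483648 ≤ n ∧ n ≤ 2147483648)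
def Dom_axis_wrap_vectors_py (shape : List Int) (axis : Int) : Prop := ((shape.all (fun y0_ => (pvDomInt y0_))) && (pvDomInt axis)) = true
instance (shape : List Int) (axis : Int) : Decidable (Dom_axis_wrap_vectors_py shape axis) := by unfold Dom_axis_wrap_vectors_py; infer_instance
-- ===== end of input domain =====

-- B replaces A's per-dimension choice lists + itertools.product with iterative output
-- doubling: one zero vector, then for each varying dimension (scanned right to left) the
-- output list is doubled by appending a half-shifted copy of every vector so far;
-- objective: alternative decomposition, same asymptotic cost.

-- ===== PORT A =====
-- itertools.product(*per_dim_choices): first factor varies slowest (exact order)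
def pyProductPy : List (List Int) → List (List Int)
  | [] => [[]]
  | c :: rest => c.flatMap (fun v => (pyProductPy rest).map (fun t => v :: t))

def half_shift_choices_py (size : Int) : List Int :=
  if size ≤ 1 then [0]
  else PySem.List.sorted (PySem.Set.ofList [0, PySem.Int.floordiv size 2]) (fun x => x) false

def axis_wrap_vectors_py (shape : List Int) (axis : Int) : List (List Int) :=
  match PySem.List.pyGet? shape axis with
  | none => []   -- shape[axis] raises IndexError; excluded by Pre_
  | some v =>
    if v ≤ 1 then [shape.map (fun _ => (0 : Int))]
    else
      let per := (PySem.List.enumerate shape).foldl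
        (fun acc ds => acc ++ [if ds.1 = axis then [(0 : Int)] else half_shift_choices_py ds.2]) []
      (pyProductPy per).map (fun values => values.map (fun value => value))

-- ===== PORT B =====
def axis_wrap_vectors_py_alt (shape : List Int) (axis : Int) : List (List Int) :=
  match PySem.List.pyGet? shape axis with
  | none => []   -- shape[axis] raises IndexError; excluded by Pre_
  | some v =>
    if v ≤ 1 then [PySem.List.pyRepeat [(0 : Int)] (shape.length : Int)]
    else
      (PySem.List.pyRange ((shape.length : Int) - 1) (-1) (-1)).foldl
        (fun out j =>
          let size := PySem.List.pyGetD shape j 0   -- shape[j]: j from range(len-1,-1,-1), always in range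
          if j = axis ∨ size ≤ 1 then out
          else out ++ out.map (fun w =>
            PySem.List.slice w none (some j) ++ [PySem.Int.floordiv size 2] ++
              PySem.List.slice w (some (j + 1)) none))
        [PySem.List.pyRepeat [(0 : Int)] (shape.length : Int)]

-- ===== PRECONDITION & SPEC =====
-- Pre_ excludes exactly the inputs where shape[axis] raises IndexError (axis out of range).
def Pre_axis_wrap_vectors_py (shape : List Int) (axis : Int) : Prop :=
  PySem.Raise.InRange shape.length axis
instance (shape : List Int) (axis : Int) : Decidable (Pre_axis_wrap_vectors_py shape axis) := by
  unfold Pre_axis_wrap_vectors_py; infer_instance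

def pvWitness_axis_wrap_vectors_py : List Int × Int := ([2, 3, 2], 0)

def Spec_axis_wrap_vectors_py (shape : List Int) (axis : Int) (out : List (List Int)) : Prop := out = axis_wrap_vectors_py_alt shape axis
instance (shape : List Int) (axis : Int) (out : List (List Int)) : Decidable (Spec_axis_wrap_vectors_py shape axis out) := by unfold Spec_axis_wrap_vectors_py; infer_instance

-- ===== CLAIM (what is proved, stated in full; the proofs are below) =====
def Claim_equal_axis_wrap_vectors_py : Prop := ∀ (shape : List Int) (axis : Int), Dom_axis_wrap_vectors_py shape axis → Pre_axis_wrap_vectors_py shape axis → Spec_axis_wrap_vectors_py shape axis (axis_wrap_vectors_py shape axis)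

-- ===== LEMMAS AND PROOFS =====

-- Common intermediate form: the product, built structurally over the shape
-- (axis is decremented on recursion, so the head dimension is the axis iff axis = 0).
def selVecs : List Int → Int → List (List Int)
  | [], _ => [[]]
  | s :: rest, axis =>
    let tails := selVecs rest (axis - 1)
    if axis ≠ 0 ∧ 1 < s then
      tails.map (fun t => 0 :: t) ++ tails.map (fun t => PySem.Int.floordiv s 2 :: t)
    else tails.map (fun t => 0 :: t)

-- B's loop body, named (definitionally the lambda in the port)
def dstep (shape : List Int) (axis : Int) (out : List (List Int)) (j : Int) : List (List Int) :=
  let size := PySem.List.pyGetD shape j 0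
  if j = axis ∨ size ≤ 1 then out
  else out ++ out.map (fun w =>
    PySem.List.slice w none (some j) ++ [PySem.Int.floordiv size 2] ++
      PySem.List.slice w (some (j + 1)) none)

theorem half_shift_eq (s : Int) (h : ¬ s ≤ 1) :
    half_shift_choices_py s = [0, PySem.Int.floordiv s 2] := by
  unfold half_shift_choices_py
  rw [if_neg h]
  have h2 : (0:Int) < 2 := by omega
  have hd : PySem.Int.floordiv s 2 = s / 2 := PySem.Int.floordiv_eq_ediv_of_pos h2
  have hpos : 1 ≤ PySem.Int.floordiv s 2 := by rw [hd]; omega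
  have hof : PySem.Set.ofList [(0:Int), PySem.Int.floordiv s 2] = [0, PySem.Int.floordiv s 2] := by
    simp [PySem.Set.ofList, PySem.Set.add, PySem.Set.contains]
    omega
  rw [hof]
  exact PySem.List.sorted_eq_self_of_pairwise _ (fun x : Int => x)
    (List.Pairwise.cons (by intro b hb; simp at hb ⊢; omega) (List.pairwise_singleton _ _))

theorem foldl_append_map {α β : Type} (l : List α) (f : α → β) (acc : List β) :
    l.foldl (fun a x => a ++ [f x]) acc = acc ++ l.map f := by
  induction l generalizing acc with
  | nil => simp
  | cons x t ih => simp [ih]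

-- A's product equals selVecs
theorem prodA_eq (shape : List Int) (axis d : Int) :
    pyProductPy ((PySem.List.enumerate shape d).map
        (fun ds => if ds.1 = axis then [(0 : Int)] else half_shift_choices_py ds.2))
      = selVecs shape (axis - d) := by
  induction shape generalizing d with
  | nil => simp [pyProductPy, selVecs, PySem.List.enumerate_nil]
  | cons s rest ih =>
    rw [PySem.List.enumerate_cons]
    have ih' := ih (d + 1)
    have harg : axis - (d + 1) = axis - d - 1 := by ring
    rw [harg] at ih'
    simp only [List.map_cons, pyProductPy, ih', selVecs]
    by_cases hda : d = axis
    ·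
      simp [hda]
    · rw [if_neg hda]
      by_cases hs : s ≤ 1
      · have hc : ¬ (axis - d ≠ 0 ∧ 1 < s) := by simp; intro h; omega
        simp [half_shift_choices_py, hs, hc]
      · have hc : (axis - d ≠ 0 ∧ 1 < s) := ⟨by omega, by omega⟩
        rw [half_shift_eq s hs, if_pos hc]
        simp [List.flatMap_cons]

-- the countdown index list of a cons shape: rest's indices shifted up, then 0
theorem range_desc_cons (m : Nat) :
    PySem.List.pyRange (m : Int) (-1) (-1)
      = (PySem.List.pyRange ((m : Int) - 1) (-1) (-1)).map (· + 1) ++ [0] := by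
  rw [PySem.List.pyRange_neg_one, PySem.List.pyRange_neg_one]
  have h1 : ((m : Int) - (-1)).toNat = m + 1 := by omega
  have h2 : ((m : Int) - 1 - (-1)).toNat = m := by omega
  rw [h1, h2, List.range_succ, List.map_append, List.map_map]
  congr 1
  · apply List.map_congr_left; intro k _; simp; ring
  · simp

theorem slice_to_cons_succ (x : Int) (t : List Int) (j : Int) (hj : 0 ≤ j) :
    PySem.List.slice (x :: t) none (some (j + 1)) = x :: PySem.List.slice t none (some j) := by
  rw [PySem.List.slice_to _ (by omega : (0:Int) ≤ j + 1), PySem.List.slice_to _ hj]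
  have h : (j + 1).toNat = j.toNat + 1 := by omega
  rw [h]; rfl

theorem slice_from_cons_succ (x : Int) (t : List Int) (j : Int) (hj : 0 ≤ j) :
    PySem.List.slice (x :: t) (some (j + 1)) none = PySem.List.slice t (some j) none := by
  rw [PySem.List.slice_from _ (by omega : (0:Int) ≤ j + 1), PySem.List.slice_from _ hj]
  have h : (j + 1).toNat = j.toNat + 1 := by omega
  rw [h]; rfl

-- one shifted step on vectors with a fixed head 0
theorem dstep_shift (s : Int) (rest : List Int) (axis : Int) (j : Int) (hj : 0 ≤ j)
    (hjlt : j < (rest.length : Int)) (O : List (List Int)) :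
    dstep (s :: rest) axis (O.map (fun t => (0 : Int) :: t)) (j + 1)
      = (dstep rest (axis - 1) O j).map (fun t => (0 : Int) :: t) := by
  unfold dstep
  have hget : PySem.List.pyGetD (s :: rest) (j + 1) 0 = PySem.List.pyGetD rest j 0 := by
    rw [PySem.List.pyGetD_eq_getElem _ _ (by omega : (0:Int) ≤ j + 1) (by simp; omega),
        PySem.List.pyGetD_eq_getElem _ _ hj (by omega)]
    have h : (j + 1).toNat = j.toNat + 1 := by omega
    simp [h]
  have hcond : (j + 1 = axis ∨ PySem.List.pyGetD (s :: rest) (j + 1) 0 ≤ 1)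
      ↔ (j = axis - 1 ∨ PySem.List.pyGetD rest j 0 ≤ 1) := by
    rw [hget]
    constructor
    · rintro (h | h)
      · exact Or.inl (by omega)
      · exact Or.inr h
    · rintro (h | h)
      · exact Or.inl (by omega)
      · exact Or.inr h
  by_cases hc : j = axis - 1 ∨ PySem.List.pyGetD rest j 0 ≤ 1
  · rw [if_pos (hcond.mpr hc), if_pos hc]
  · rw [if_neg (fun h => hc (hcond.mp h)), if_neg hc]
    rw [List.map_append, List.map_map, List.map_map, hget]
    congr 1
    apply List.map_congr_left
    intro t _
    simp only [Function.comp]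
    rw [slice_to_cons_succ 0 t j hj, slice_from_cons_succ 0 t (j + 1) (by omega)]
    rfl

-- the whole shifted fold on vectors with a fixed head 0
theorem dfold_shift (s : Int) (rest : List Int) (axis : Int) (js : List Int)
    (hjs : ∀ j ∈ js, 0 ≤ j ∧ j < (rest.length : Int)) (O : List (List Int)) :
    (js.map (· + 1)).foldl (dstep (s :: rest) axis) (O.map (fun t => (0 : Int) :: t))
      = (js.foldl (dstep rest (axis - 1)) O).map (fun t => (0 : Int) :: t) := by
  induction js generalizing O with
  | nil => simp
  | cons j t ih =>
    obtain ⟨hj, hjlt⟩ := hjs j (by simp)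
    have ht : ∀ k ∈ t, 0 ≤ k ∧ k < (rest.length : Int) := fun k hk => hjs k (by simp [hk])
    rw [List.map_cons, List.foldl_cons, List.foldl_cons, dstep_shift s rest axis j hj hjlt O]
    exact ih ht _

-- B's doubling fold equals selVecs
theorem dfold_eq (shape : List Int) (axis : Int) :
    (PySem.List.pyRange ((shape.length : Int) - 1) (-1) (-1)).foldl (dstep shape axis)
        [List.replicate shape.length (0 : Int)]
      = selVecs shape axis := by
  induction shape generalizing axis with
  | nil =>
    rw [PySem.List.pyRange_neg_one_eq_nil (by norm_num)]
    simp [selVecs]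
  | cons s rest ih =>
    have hlen : ((s :: rest).length : Int) - 1 = (rest.length : Int) := by simp
    rw [hlen, range_desc_cons rest.length, List.foldl_append]
    have hjs : ∀ j ∈ PySem.List.pyRange ((rest.length : Int) - 1) (-1) (-1),
        0 ≤ j ∧ j < (rest.length : Int) := by
      intro j hj
      rw [PySem.List.mem_pyRange_neg_one] at hj
      omega
    have hrep : List.replicate (s :: rest).length (0 : Int)
        = (0 : Int) :: List.replicate rest.length (0 : Int) := rfl
    have hinit : [List.replicate (s :: rest).length (0 : Int)]
        = ([List.replicate rest.length (0 : Int)]).map (fun t => (0 : Int) :: t) := by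
      rw [hrep]; rfl
    rw [hinit, dfold_shift s rest axis _ hjs, ih (axis - 1)]
    rw [List.foldl_cons, List.foldl_nil]
    unfold dstep
    have hget : PySem.List.pyGetD (s :: rest) 0 0 = s := PySem.List.pyGetD_zero_cons _ _ _
    rw [hget]
    by_cases hc : (0 : Int) = axis ∨ s ≤ 1
    · rw [if_pos hc]
      show _ = selVecs (s :: rest) axis
      simp only [selVecs]
      rw [if_neg (by
        rintro ⟨h1, h2⟩
        rcases hc with hc | hc
        · exact h1 hc.symm
        · omega)]
    · rw [if_neg hc]
      show _ = selVecs (s :: rest) axis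
      simp only [selVecs]
      rw [if_pos ⟨fun h => hc (Or.inl h.symm), by omega⟩]
      congr 1
      rw [List.map_map]
      apply List.map_congr_left
      intro t _
      simp only [Function.comp]
      rw [PySem.List.slice_to _ (le_refl (0:Int)), PySem.List.slice_from _ (by omega : (0:Int) ≤ 0 + 1)]
      rfl

-- ===== VERDICT (by name: the statement is the Claim_ definition above) =====
theorem axis_wrap_vectors_py_spec : Claim_equal_axis_wrap_vectors_py := by
  intro shape axis _hdom hpre
  unfold Spec_axis_wrap_vectors_py
  obtain ⟨v, hv⟩ : ∃ v, PySem.List.pyGet? shape axis = some v := by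
    cases h : PySem.List.pyGet? shape axis with
    | none => exact absurd hpre (by rw [PySem.List.pyGet?_eq_none_iff] at h; exact h)
    | some v => exact ⟨v, rfl⟩
  unfold axis_wrap_vectors_py axis_wrap_vectors_py_alt
  rw [hv]
  have hrep : PySem.List.pyRepeat [(0:Int)] (shape.length : Int)
      = List.replicate shape.length (0:Int) := by
    rw [PySem.List.pyRepeat_singleton]; simp
  by_cases hvle : v ≤ 1
  · simp only [if_pos hvle, hrep]
    congr 1
    rw [List.map_const']
  · simp only [if_neg hvle, hrep]
    rw [foldl_append_map, List.nil_append]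
    have hA := prodA_eq shape axis 0
    rw [sub_zero] at hA
    rw [hA]
    simp only [List.map_id']
    exact (dfold_eq shape axis).symm
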